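-- pv_equiv track=rewrite | github.com/AdamZhouSE/pythonHomework | Code/CodeRecords/2617/60760/296043.py | func
-- ===== SOURCE A (Python) =====
-- def func(strs:str,k:int):
--     length=len(strs)
--     res=0
--     for i in range(1,length+1):
--         for j in range(length-i+1):
--             temp=strs[j:j+i]
--             if temp.count('1')==k:
--                 res+=1
--     return res
-- ===== SOURCE B (Python) =====
-- def func(strs: str, k: int):
--     # prefix-sum of ones + hashmap of prefix-value frequencies: one pass
--     freq = {0: 1}
--     p = 0
--     res = 0
--     for c in strs:
--         if c == '1':
--             p += 1
--         res += freq.get(p - k, 0)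
--         freq[p] = freq.get(p, 0) + 1
--     return res
-- ===== Notes on version B (the rewrite author's own statement) =====
-- stated objective: faster
-- what changed: replaces the enumerate-every-substring-and-count loop by a single pass that keeps a running count of ones and a hashmap of prefix-count frequencies
import Mathlib
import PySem

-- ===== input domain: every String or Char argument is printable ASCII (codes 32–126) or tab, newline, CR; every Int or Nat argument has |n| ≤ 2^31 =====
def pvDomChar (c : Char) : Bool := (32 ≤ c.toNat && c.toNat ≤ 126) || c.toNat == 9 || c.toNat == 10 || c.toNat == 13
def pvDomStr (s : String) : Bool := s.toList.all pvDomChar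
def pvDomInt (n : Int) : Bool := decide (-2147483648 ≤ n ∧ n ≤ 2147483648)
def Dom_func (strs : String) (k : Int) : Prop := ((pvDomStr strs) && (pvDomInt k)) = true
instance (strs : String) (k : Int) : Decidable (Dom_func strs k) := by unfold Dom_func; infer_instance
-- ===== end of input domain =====

-- B replaces A's enumerate-every-substring-and-count loops by a single pass with a
-- running ones-count and a hashmap of prefix-count frequencies (objective: faster).

-- ===== PORT A =====
def func (strs : String) (k : Int) : Int :=
  let length : Int := PySem.Str.len strs
  (PySem.List.pyRange 1 (length + 1) 1).foldl (fun res i =>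
    (PySem.List.pyRange 0 (length - i + 1) 1).foldl (fun res j =>
      let temp := PySem.List.slice strs.toList (some j) (some (j + i))
      if ((PySem.Chars.count temp ['1'] : Nat) : Int) = k then res + 1 else res) res) 0

-- ===== PORT B =====
def func_alt (strs : String) (k : Int) : Int :=
  (strs.toList.foldl
    (fun (st : PySem.Dict Int Int × Int × Int) c =>
      let p := if c = '1' then st.2.1 + 1 else st.2.1
      let res := st.2.2 + st.1.getD (p - k) 0
      (st.1.insert p (st.1.getD p 0 + 1), p, res))
    (PySem.Dict.empty.insert 0 1, 0, 0)).2.2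

-- ===== PRECONDITION & SPEC =====
def Spec_func (strs : String) (k : Int) (out : Int) : Prop := out = func_alt strs k
instance (strs : String) (k : Int) (out : Int) : Decidable (Spec_func strs k out) := by unfold Spec_func; infer_instance

-- ===== CLAIM (what is proved, stated in full; the proofs are below) =====
def Claim_equal_func : Prop := ∀ (strs : String) (k : Int), Dom_func strs k → Spec_func strs k (func strs k)

-- ===== LEMMAS AND PROOFS =====

-- A's body on a plain character list (same computation as `func`)
def funcList (cs : List Char) (k : Int) : Int :=
  (PySem.List.pyRange 1 ((cs.length : Int) + 1) 1).foldl (fun res i =>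
    (PySem.List.pyRange 0 ((cs.length : Int) - i + 1) 1).foldl (fun res j =>
      let temp := PySem.List.slice cs (some j) (some (j + i))
      if ((PySem.Chars.count temp ['1'] : Nat) : Int) = k then res + 1 else res) res) 0

theorem func_eq_funcList (strs : String) (k : Int) : func strs k = funcList strs.toList k := by
  simp [func, funcList]

-- B's loop step and loop, as in `func_alt`
def stepB (k : Int) (st : PySem.Dict Int Int × Int × Int) (c : Char) :
    PySem.Dict Int Int × Int × Int :=
  let p := if c = '1' then st.2.1 + 1 else st.2.1
  let res := st.2.2 + st.1.getD (p - k) 0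
  (st.1.insert p (st.1.getD p 0 + 1), p, res)

def loopB (k : Int) (cs : List Char) : PySem.Dict Int Int × Int × Int :=
  cs.foldl (stepB k) (PySem.Dict.empty.insert 0 1, 0, 0)

theorem func_alt_eq_loopB (strs : String) (k : Int) :
    func_alt strs k = (loopB k strs.toList).2.2 := rfl

-- number of '1' in the m-prefix
def Pcs (cs : List Char) (m : Nat) : Int := ((cs.take m).count '1' : Nat)

-- `temp.count('1')` for the one-character pattern '1' is the character count
theorem countGo_one : ∀ (fuel : Nat) (l : List Char) (acc : Nat), l.length ≤ fuel →
    PySem.Chars.count.go ['1'] fuel l acc = acc + l.count '1'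
  | 0, l, acc, h => by
      have hl : l = [] := List.length_eq_zero_iff.mp (Nat.le_zero.mp h)
      subst hl; simp [PySem.Chars.count.go]
  | fuel+1, [], acc, h => by simp [PySem.Chars.count.go]
  | fuel+1, x :: t, acc, h => by
      have ht : t.length ≤ fuel := by simpa using h
      have hrec1 := countGo_one fuel t (acc + 1) ht
      have hrec2 := countGo_one fuel t acc ht
      simp only [PySem.Chars.count.go, List.isPrefixOf, Bool.and_true, List.length_cons,
        List.length_nil, List.drop_succ_cons, List.drop_zero]
      by_cases hx : x = '1'
      · subst hx
        rw [if_pos (by simp), hrec1]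
        simp
        omega
      · have hx2 : ¬('1' = x) := fun hh => hx hh.symm
        rw [if_neg (by simp only [beq_iff_eq]; exact hx2), hrec2]
        simp [hx]

theorem count_one_char (l : List Char) :
    PySem.Chars.count l ['1'] = l.count '1' := by
  simpa using countGo_one l.length l 0 le_rfl

-- reflecting the index range does not change a count
theorem countP_range_reflect (n : Nat) : ∀ (q : Nat → Bool),
    (List.range (n + 1)).countP (fun t => q (n - t)) = (List.range (n + 1)).countP q := by
  induction n with
  | zero => intro q; simp
  | succ n ih =>
    intro q
    have h1 : List.range (n + 2) = 0 :: (List.range (n + 1)).map Nat.succ :=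
      List.range_succ_eq_map
    have h2 : List.range (n + 2) = List.range (n + 1) ++ [n + 1] := List.range_succ
    have e0 : ((fun t => q (n + 1 - t)) ∘ Nat.succ) = (fun t => q (n - t)) := by
      funext t
      simp [Nat.succ_sub_succ]
    have e1 : (List.range (n + 2)).countP (fun t => q (n + 1 - t))
        = (if q (n + 1) then 1 else 0) + (List.range (n + 1)).countP (fun t => q (n - t)) := by
      rw [h1]
      simp only [List.countP_cons, List.countP_map, e0]
      simp only [Nat.sub_zero]
      split_ifs <;> omega
    rw [e1, ih q, h2, List.countP_append]
    simp only [List.countP_cons, List.countP_nil]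
    split_ifs <;> omega

-- a 0/1 Prop-sum is a count
theorem sum_map_ite_prop {α : Type} (P : α → Prop) [DecidablePred P] (xs : List α) :
    (xs.map (fun x => if P x then (1 : Int) else 0)).sum
      = ((xs.countP fun x => decide (P x) : Nat) : Int) := by
  rw [← PySem.List.sum_map_ite_one_zero]
  congr 1
  apply List.map_congr_left
  intro x _
  by_cases h : P x <;> simp [h]

-- the inner count of A, named
def innerCnt (cs : List Char) (k i : Int) : Nat :=
  (PySem.List.pyRange 0 ((cs.length : Int) - i + 1) 1).countP (fun j =>
    decide (((PySem.Chars.count (PySem.List.slice cs (some j) (some (j + i))) ['1'] : Nat) : Int) = k))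

theorem funcList_eq_sum (cs : List Char) (k : Int) :
    funcList cs k = ((PySem.List.pyRange 1 ((cs.length : Int) + 1) 1).map
      (fun i => (innerCnt cs k i : Int))).sum := by
  simp only [funcList]
  have hfun : (fun (res i : Int) =>
      (PySem.List.pyRange 0 ((cs.length : Int) - i + 1) 1).foldl (fun res j =>
        if ((PySem.Chars.count (PySem.List.slice cs (some j) (some (j + i))) ['1'] : Nat) : Int) = k
        then res + 1 else res) res)
      = (fun (res i : Int) => res + (innerCnt cs k i : Int)) := by
    funext res i
    rw [PySem.List.foldl_ite_add_one]
    rfl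
  rw [hfun, PySem.List.foldl_add]
  simp

-- slicing inside the old part ignores the appended character
theorem slice_append_eq (cs : List Char) (c : Char) (i j : Int)
    (h0 : 0 ≤ j) (h1 : 0 ≤ i) (h2 : j + i ≤ (cs.length : Int)) :
    PySem.List.slice (cs ++ [c]) (some j) (some (j + i))
      = PySem.List.slice cs (some j) (some (j + i)) := by
  rw [PySem.List.slice_toNat _ h0 (by omega), PySem.List.slice_toNat _ h0 (by omega)]
  rw [List.drop_append_of_le_length (by omega)]
  rw [List.take_append_of_le_length (by simp; omega)]

-- count of a dropped suffix, via prefix counts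
theorem count_drop_eq (cs : List Char) (m : Nat) (_hm : m ≤ cs.length) :
    ((cs.drop m).count '1' : Int) = ((cs.count '1' : Nat) : Int) - Pcs cs m := by
  have h := List.take_append_drop m cs
  have : (cs.take m).count '1' + (cs.drop m).count '1' = cs.count '1' := by
    conv_rhs => rw [← h]
    rw [List.count_append]
  unfold Pcs
  omega

-- the test A performs on the one new substring of each length
def extraTerm (cs : List Char) (c : Char) (k i : Int) : Int :=
  if ((PySem.Chars.count (PySem.List.slice (cs ++ [c])
      (some ((cs.length : Int) + 1 - i)) (some ((cs.length : Int) + 1))) ['1'] : Nat) : Int) = k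
  then 1 else 0

-- one appended character: each old inner count survives, plus the new end-substring test
theorem inner_append (cs : List Char) (c : Char) (k i : Int)
    (h1 : 1 ≤ i) (h2 : i ≤ (cs.length : Int) + 1) :
    (innerCnt (cs ++ [c]) k i : Int) = (innerCnt cs k i : Int) + extraTerm cs c k i := by
  unfold innerCnt extraTerm
  have hlen : ((cs ++ [c]).length : Int) = (cs.length : Int) + 1 := by simp
  rw [hlen]
  have hsplit : PySem.List.pyRange 0 ((cs.length : Int) + 1 - i + 1) 1
      = PySem.List.pyRange 0 ((cs.length : Int) - i + 1) 1 ++ [(cs.length : Int) + 1 - i] := by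
    have h3 : (cs.length : Int) + 1 - i + 1 = ((cs.length : Int) - i + 1) + 1 := by ring
    rw [h3, PySem.List.pyRange_one_succ_right (by omega)]
    congr 2
    ring
  rw [hsplit, List.countP_append]
  have hcongr : (PySem.List.pyRange 0 ((cs.length : Int) - i + 1) 1).countP (fun j =>
        decide (((PySem.Chars.count (PySem.List.slice (cs ++ [c]) (some j) (some (j + i))) ['1'] : Nat) : Int) = k))
      = (PySem.List.pyRange 0 ((cs.length : Int) - i + 1) 1).countP (fun j =>
        decide (((PySem.Chars.count (PySem.List.slice cs (some j) (some (j + i))) ['1'] : Nat) : Int) = k)) := by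
    apply List.countP_congr
    intro j hj
    rw [PySem.List.mem_pyRange_one] at hj
    rw [slice_append_eq cs c i j (by omega) (by omega) (by omega)]
  rw [hcongr]
  have h4 : ((cs.length : Int) + 1 - i) + i = (cs.length : Int) + 1 := by ring
  push_cast
  rw [List.countP_singleton, h4]
  split_ifs with h <;> simp_all

-- the new end-substring tests, summed over all lengths, count the matching prefixes
theorem extra_sum_eq (cs : List Char) (c : Char) (k : Int) :
    ((PySem.List.pyRange 1 ((cs.length : Int) + 2) 1).map (extraTerm cs c k)).sum
      = (((List.range (cs.length + 1)).countP
          (fun m => decide (Pcs cs m = (((cs ++ [c]).count '1' : Nat) : Int) - k))) : Nat) := by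
  have hR : PySem.List.pyRange 1 ((cs.length : Int) + 2) 1
      = (List.range (cs.length + 1)).map (fun t : Nat => 1 + (t : Int)) := by
    have h0 : (((cs.length : Int) + 2) - 1).toNat = cs.length + 1 := by omega
    rw [PySem.List.pyRange_one, h0]
  rw [hR, List.map_map]
  have hpt : ∀ t ∈ List.range (cs.length + 1),
      (extraTerm cs c k ∘ (fun t : Nat => 1 + (t : Int))) t
        = (if Pcs cs (cs.length - t) = (((cs ++ [c]).count '1' : Nat) : Int) - k
           then (1 : Int) else 0) := by
    intro t ht
    rw [List.mem_range] at ht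
    simp only [Function.comp_apply, extraTerm]
    have e1 : (cs.length : Int) + 1 - (1 + (t : Int)) = (cs.length : Int) - t := by ring
    rw [e1]
    have e2 : PySem.List.slice (cs ++ [c]) (some ((cs.length : Int) - t)) (some ((cs.length : Int) + 1))
        = (cs ++ [c]).drop (cs.length - t) := by
      rw [PySem.List.slice_toNat _ (by omega) (by omega)]
      have h3 : ((cs.length : Int) - t).toNat = cs.length - t := by omega
      have h4 : ((cs.length : Int) + 1).toNat = cs.length + 1 := by omega
      rw [h3, h4]
      apply List.take_of_length_le
      simp only [List.length_drop, List.length_append, List.length_cons, List.length_nil]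
      omega
    rw [e2, count_one_char]
    rw [count_drop_eq (cs ++ [c]) (cs.length - t) (by simp only [List.length_append, List.length_cons, List.length_nil]; omega)]
    have e6 : Pcs (cs ++ [c]) (cs.length - t) = Pcs cs (cs.length - t) := by
      unfold Pcs
      rw [List.take_append_of_le_length (by omega)]
    rw [e6]
    split_ifs with h1 h2 <;> omega
  rw [List.map_congr_left hpt]
  rw [sum_map_ite_prop (fun t => Pcs cs (cs.length - t) = (((cs ++ [c]).count '1' : Nat) : Int) - k)]
  rw [countP_range_reflect cs.length (fun m => decide (Pcs cs m = (((cs ++ [c]).count '1' : Nat) : Int) - k))]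

-- appending one character adds exactly the substrings that end at the new position
theorem funcList_append (cs : List Char) (c : Char) (k : Int) :
    funcList (cs ++ [c]) k = funcList cs k +
      (((List.range (cs.length + 1)).countP
        (fun m => decide (Pcs cs m = (((cs ++ [c]).count '1' : Nat) : Int) - k))) : Int) := by
  have hb : ((cs ++ [c]).length : Int) + 1 = (cs.length : Int) + 2 := by
    push_cast [List.length_append, List.length_cons, List.length_nil]
    ring
  rw [funcList_eq_sum (cs ++ [c]) k, hb]
  have hmap : ∀ i ∈ PySem.List.pyRange 1 ((cs.length : Int) + 2) 1,
      (innerCnt (cs ++ [c]) k i : Int) = (innerCnt cs k i : Int) + extraTerm cs c k i := by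
    intro i hi
    rw [PySem.List.mem_pyRange_one] at hi
    exact inner_append cs c k i hi.1 (by omega)
  rw [List.map_congr_left hmap, PySem.List.sum_map_add_int, extra_sum_eq]
  congr 1
  have hsplitR : PySem.List.pyRange 1 ((cs.length : Int) + 2) 1
      = PySem.List.pyRange 1 ((cs.length : Int) + 1) 1 ++ [(cs.length : Int) + 1] := by
    rw [show (cs.length : Int) + 2 = ((cs.length : Int) + 1) + 1 from by ring]
    exact PySem.List.pyRange_one_succ_right (by omega)
  rw [hsplitR, List.map_append, List.sum_append]
  have hlast : (innerCnt cs k ((cs.length : Int) + 1) : Int) = 0 := by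
    unfold innerCnt
    rw [show (cs.length : Int) - ((cs.length : Int) + 1) + 1 = 0 from by ring]
    rw [PySem.List.pyRange_one_eq_nil le_rfl]
    simp
  rw [funcList_eq_sum cs k]
  simp [hlast]

-- prefix-count table of cs ++ [c] extends that of cs
theorem countP_prefix_append (cs : List Char) (c : Char) (v : Int) :
    ((List.range (cs.length + 2)).countP (fun m => decide (Pcs (cs ++ [c]) m = v)) : Int)
      = ((List.range (cs.length + 1)).countP (fun m => decide (Pcs cs m = v)) : Int)
        + (if v = (((cs ++ [c]).count '1' : Nat) : Int) then 1 else 0) := by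
  have h2 : List.range (cs.length + 2) = List.range (cs.length + 1) ++ [cs.length + 1] :=
    List.range_succ
  rw [h2, List.countP_append, List.countP_singleton]
  have hcongr : (List.range (cs.length + 1)).countP (fun m => decide (Pcs (cs ++ [c]) m = v))
      = (List.range (cs.length + 1)).countP (fun m => decide (Pcs cs m = v)) := by
    apply List.countP_congr
    intro m hm
    rw [List.mem_range] at hm
    unfold Pcs
    rw [List.take_append_of_le_length (by omega)]
  rw [hcongr]
  have hfull : Pcs (cs ++ [c]) (cs.length + 1) = (((cs ++ [c]).count '1' : Nat) : Int) := by
    unfold Pcs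
    rw [List.take_of_length_le (by simp)]
  rw [hfull]
  push_cast
  split_ifs with ha hb hb <;> simp_all

-- the loop invariant of B's single pass
theorem loopB_inv (k : Int) (cs : List Char) :
    (loopB k cs).2.1 = ((cs.count '1' : Nat) : Int)
  ∧ (∀ v, (loopB k cs).1.getD v 0
      = ((List.range (cs.length + 1)).countP (fun m => decide (Pcs cs m = v)) : Int))
  ∧ (loopB k cs).2.2 = funcList cs k := by
  induction cs using List.reverseRecOn with
  | nil =>
    refine ⟨by simp [loopB], ?_, ?_⟩
    · intro v
      simp only [loopB, List.foldl_nil]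
      rw [PySem.Dict.getD_insert]
      rw [show List.range (List.length ([] : List Char) + 1) = [0] from rfl]
      rw [List.countP_singleton]
      unfold Pcs
      simp only [List.take_nil, List.count_nil, Nat.cast_zero]
      by_cases hv : v = 0
      · subst hv; simp
      · rw [if_neg hv, PySem.Dict.getD_empty]
        have : ¬((0 : Int) = v) := fun hh => hv hh.symm
        simp [this]
    · simp only [loopB, List.foldl_nil]
      unfold funcList
      rw [show ((List.length ([] : List Char) : Int) + 1) = 1 from by simp]
      rw [PySem.List.pyRange_one_eq_nil le_rfl]
      simp
  | append_singleton cs c ih =>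
    obtain ⟨ih1, ih2, ih3⟩ := ih
    have hstep : loopB k (cs ++ [c]) = stepB k (loopB k cs) c := by
      simp [loopB, List.foldl_append]
    have hT : ((((cs ++ [c]).count '1' : Nat)) : Int)
        = (if c = '1' then ((cs.count '1' : Nat) : Int) + 1 else ((cs.count '1' : Nat) : Int)) := by
      rw [List.count_append]
      by_cases hc : c = '1' <;> simp [hc]
    have hp2 : (if c = '1' then (loopB k cs).2.1 + 1 else (loopB k cs).2.1)
        = ((((cs ++ [c]).count '1' : Nat)) : Int) := by
      rw [ih1]
      exact hT.symm
    refine ⟨?_, ?_, ?_⟩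
    · rw [hstep]
      simp only [stepB]
      exact hp2
    · intro v
      rw [hstep]
      simp only [stepB]
      rw [PySem.Dict.getD_insert]
      rw [show (cs ++ [c]).length + 1 = cs.length + 2 from by simp]
      rw [countP_prefix_append]
      rw [hp2, ih2 v, ih2 ((((cs ++ [c]).count '1' : Nat)) : Int)]
      by_cases hv : v = ((((cs ++ [c]).count '1' : Nat)) : Int)
      · subst hv; simp
      · rw [if_neg hv, if_neg hv]
        simp
    · rw [hstep]
      simp only [stepB]
      rw [ih3, hp2, ih2, funcList_append]

-- ===== VERDICT (by name: the statement is the Claim_ definition above) =====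
theorem func_spec : Claim_equal_func := by
  intro strs k _
  unfold Spec_func
  rw [func_eq_funcList, func_alt_eq_loopB, (loopB_inv k strs.toList).2.2]
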